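-- pv_equiv track=rewrite | github.com/XanderGardner/rental_pricing | main.py | parse_dollars
-- ===== SOURCE A (Python) =====
-- def parse_dollars(dom_text):
--     arr_dom_text = dom_text.split()
--     dollar_strs = []
--     for text in arr_dom_text:
--         if text[0] == "$":
--             dollar_strs.append(text[1:])
--
--     acceptable_chars = {"0", "1", "2", "3", "4", "5", "6", "7", "8", "9", ","}
--     dollar_values = []
--     for dollar_str in dollar_strs:
--         i = 0
--         while i < len(dollar_str) and dollar_str[i] in acceptable_chars:
--             i += 1
--         i -= 1
--         # extract numerical value
--         multiplier = 1
--         value = 0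
--         while i >= 0:
--             if dollar_str[i] == ",":
--                 i -= 1
--                 continue
--             else:
--                 value += multiplier * int(dollar_str[i])
--                 multiplier *= 10
--                 i -= 1
--         dollar_values.append(round(value, 2))
--     return dollar_values
-- ===== SOURCE B (Python) =====
-- def parse_dollars(dom_text):
--     values = []
--     for tok in dom_text.split():
--         if tok.startswith("$"):
--             value = 0
--             for ch in tok[1:]:
--                 if ch == ",":
--                     continue
--                 if not ch.isdigit():
--                     break
--                 value = value * 10 + (ord(ch) - ord("0"))
--             values.append(value)
--     return values
-- ===== Notes on version B (the rewrite author's own statement) =====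
-- stated objective: simpler
-- what changed: A collects '$'-tokens into an intermediate list, scans each token's digit/comma prefix by index, then re-reads it backwards accumulating digit*multiplier; B does a single forward pass per token, building the value Horner-style (value = value*10 + digit) and skipping commas, with no intermediate list and no backward read.
import Mathlib
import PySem

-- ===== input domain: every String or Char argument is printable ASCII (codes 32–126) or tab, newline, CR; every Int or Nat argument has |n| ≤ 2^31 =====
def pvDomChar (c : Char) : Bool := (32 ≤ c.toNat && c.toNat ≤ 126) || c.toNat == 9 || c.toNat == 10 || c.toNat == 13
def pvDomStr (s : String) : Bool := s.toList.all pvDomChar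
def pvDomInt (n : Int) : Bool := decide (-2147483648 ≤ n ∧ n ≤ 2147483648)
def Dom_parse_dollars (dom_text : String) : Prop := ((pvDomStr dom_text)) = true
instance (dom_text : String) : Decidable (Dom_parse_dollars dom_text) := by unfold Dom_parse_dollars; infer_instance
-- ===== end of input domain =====

-- B fuses A's three passes (collect '$'-tokens, scan the digit/comma prefix by index, then
-- re-read it backwards with a multiplier) into one forward Horner-style pass per token; same
-- return value, simpler structure (objective: simpler).

-- ===== PORT A =====
-- acceptable_chars = {"0", …, "9", ","}
def pvAcceptable : PySem.Set Char :=
  PySem.Set.ofList ['0', '1', '2', '3', '4', '5', '6', '7', '8', '9', ',']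

-- 'i = 0; while i < len(s) and s[i] in acceptable_chars: i += 1' — the resulting i,
-- as structural recursion over the same characters
def pvAPrefixLen : List Char → Nat
  | [] => 0
  | c :: rest => if pvAcceptable.contains c then pvAPrefixLen rest + 1 else 0

-- the second while loop: index i-1 … 0 (fuel n is i+1); cs.getD n ' ' is cs[n] (n < len here);
-- int(c) on the guarded digit char is exactly (c.toNat - 48)
def pvABackward (cs : List Char) : Nat → Int → Int → Int
  | 0, _mult, value => value
  | n + 1, mult, value =>
      if cs.getD n ' ' = ',' then pvABackward cs n mult value
      else pvABackward cs n (mult * 10) (value + mult * (((cs.getD n ' ').toNat : Int) - 48))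

def parse_dollars (dom_text : String) : List Int :=
  let arr_dom_text := PySem.Chars.split₀ dom_text.toList
  let dollar_strs := arr_dom_text.foldl (fun acc text =>
    match text with
    | [] => acc                 -- unreachable: split() never yields an empty token
    | c :: rest => if c = '$' then acc ++ [rest] else acc) []   -- text[0] == "$"; text[1:] = rest
  -- round(value, 2) on an int is the int itself
  dollar_strs.foldl (fun vals s => vals ++ [pvABackward s (pvAPrefixLen s) 1 0]) []

-- ===== PORT B =====
-- the forward for-loop over tok[1:]: ','→continue, non-digit→break, digit→Horner step
-- (ord(ch) - ord('0') is (ch.toNat - 48))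
def pvBVal : List Char → Int → Int
  | [], value => value
  | c :: rest, value =>
      if c = ',' then pvBVal rest value
      else if PySem.Chars.isdigit c then pvBVal rest (value * 10 + ((c.toNat : Int) - 48))
      else value

def parse_dollars_alt (dom_text : String) : List Int :=
  (PySem.Chars.split₀ dom_text.toList).foldl (fun values tok =>
    if PySem.Chars.startswith tok ['$'] then values ++ [pvBVal (tok.drop 1) 0] else values) []

-- ===== PRECONDITION & SPEC =====
def Spec_parse_dollars (dom_text : String) (out : List Int) : Prop := out = parse_dollars_alt dom_text
instance (dom_text : String) (out : List Int) : Decidable (Spec_parse_dollars dom_text out) := by unfold Spec_parse_dollars; infer_instance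

-- ===== CLAIM (what is proved, stated in full; the proofs are below) =====
def Claim_equal_parse_dollars : Prop := ∀ (dom_text : String), Dom_parse_dollars dom_text → Spec_parse_dollars dom_text (parse_dollars dom_text)

-- ===== LEMMAS AND PROOFS =====

-- the token predicate both ports filter by
def pvIsDollar : List Char → Bool
  | [] => false
  | c :: _ => c == '$'

-- the character class both ports scan ("0"-"9" or ",")
def pvQ (c : Char) : Bool := (c == ',') || PySem.Chars.isdigit c

-- proof-side: A's backward loop read front-to-back over the reversed prefix
def pvRAcc : List Char → Int → Int → Int
  | [], _mult, value => value
  | c :: rest, mult, value =>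
      if c = ',' then pvRAcc rest mult value
      else pvRAcc rest (mult * 10) (value + mult * ((c.toNat : Int) - 48))

-- proof-side: B's Horner loop restricted to the acceptable prefix (no break branch)
def pvH : List Char → Int → Int
  | [], value => value
  | c :: rest, value =>
      if c = ',' then pvH rest value
      else pvH rest (value * 10 + ((c.toNat : Int) - 48))

-- number of non-comma (digit) positions
def pvCnt : List Char → Nat
  | [] => 0
  | c :: rest => if c = ',' then pvCnt rest else pvCnt rest + 1

lemma pvAcceptable_eq (c : Char) : pvAcceptable.contains c = pvQ c := by
  simp only [pvQ, PySem.Chars.isdigit]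
  by_cases h : c = ','
  · subst h; decide
  · by_cases hd : '0' ≤ c ∧ c ≤ '9'
    · have h1 : 48 ≤ c.toNat := Fin.mk_le_mk.mp hd.1
      have h2 : c.toNat ≤ 57 := Fin.mk_le_mk.mp hd.2
      have h3 : c.toNat = 48 ∨ c.toNat = 49 ∨ c.toNat = 50 ∨ c.toNat = 51 ∨ c.toNat = 52 ∨
          c.toNat = 53 ∨ c.toNat = 54 ∨ c.toNat = 55 ∨ c.toNat = 56 ∨ c.toNat = 57 := by omega
      have hofn := Char.ofNat_toNat c
      rcases h3 with h' | h' | h' | h' | h' | h' | h' | h' | h' | h' <;>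
        (rw [h'] at hofn; rw [← hofn]; decide)
    · have hb : (c == ',') = false := by simp [h]
      have h0 : (decide ('0' ≤ c) && decide (c ≤ '9')) = false := by
        by_cases h1 : '0' ≤ c
        · have h2 : ¬ c ≤ '9' := fun h2 => hd ⟨h1, h2⟩
          simp [h2]
        · simp [h1]
      rw [hb, h0, Bool.or_false]
      have hset : pvAcceptable = ['0', '1', '2', '3', '4', '5', '6', '7', '8', '9', ','] := by
        decide
      have hmem : c ∉ (['0', '1', '2', '3', '4', '5', '6', '7', '8', '9', ','] : List Char) := by
        intro hc
        fin_cases hc <;> first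
          | exact h rfl
          | exact hd ⟨by decide, by decide⟩
      rw [hset]
      simpa using hmem

lemma pvAPrefixLen_cons (c : Char) (rest : List Char) :
    pvAPrefixLen (c :: rest) = if pvQ c then pvAPrefixLen rest + 1 else 0 := by
  rw [pvAPrefixLen, pvAcceptable_eq]

lemma pvCnt_eq_countP (l : List Char) : pvCnt l = l.countP (fun c => !(c == ',')) := by
  induction l with
  | nil => rfl
  | cons c rest ih =>
    by_cases h : c = ',' <;> simp [pvCnt, h, List.countP_cons, ih]

lemma pvRAcc_append (xs ys : List Char) (m v : Int) :
    pvRAcc (xs ++ ys) m v = pvRAcc ys (m * 10 ^ pvCnt xs) (pvRAcc xs m v) := by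
  induction xs generalizing m v with
  | nil =>
    show pvRAcc ys m v = pvRAcc ys (m * 10 ^ pvCnt []) (pvRAcc [] m v)
    simp only [pvCnt, pvRAcc, pow_zero, mul_one]
  | cons c rest ih =>
    by_cases h : c = ','
    · simp [pvRAcc, pvCnt, h, ih]
    · simp only [List.cons_append, pvRAcc, pvCnt, if_neg h, ih]
      ring_nf

lemma pvH_shift (l : List Char) (v : Int) : pvH l v = v * 10 ^ pvCnt l + pvH l 0 := by
  induction l generalizing v with
  | nil => simp [pvH, pvCnt]
  | cons c rest ih =>
    by_cases h : c = ','
    · simp only [pvH, pvCnt, if_pos h]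
      exact ih v
    · simp only [pvH, pvCnt, if_neg h]
      rw [ih (v * 10 + _), ih (0 * 10 + _)]
      ring

lemma pvRAcc_reverse (l : List Char) (m v : Int) :
    pvRAcc l.reverse m v = v + m * pvH l 0 := by
  induction l generalizing m v with
  | nil => simp [pvRAcc, pvH]
  | cons c rest ih =>
    rw [List.reverse_cons, pvRAcc_append, ih]
    have hc : pvCnt rest.reverse = pvCnt rest := by
      simp [pvCnt_eq_countP, List.countP_reverse]
    by_cases h : c = ','
    · simp only [pvRAcc, pvH, if_pos h]
    · simp only [pvRAcc, pvH, if_neg h, hc]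
      rw [pvH_shift rest (0 * 10 + _)]
      ring

lemma pvABackward_eq_pvRAcc (cs : List Char) (n : Nat) (hn : n ≤ cs.length) (m v : Int) :
    pvABackward cs n m v = pvRAcc ((cs.take n).reverse) m v := by
  induction n generalizing m v with
  | zero => simp [pvABackward, pvRAcc]
  | succ k ih =>
    have hk : k < cs.length := by omega
    have hget : cs.getD k ' ' = cs[k] := List.getD_eq_getElem cs ' ' hk
    have htake : (cs.take (k + 1)).reverse = cs[k] :: (cs.take k).reverse := by
      rw [List.take_succ]
      simp [List.getElem?_eq_getElem hk]
    rw [htake]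
    simp only [pvABackward, pvRAcc, hget]
    by_cases h : cs[k] = ','
    · simp only [if_pos h, ih (by omega)]
    · simp only [if_neg h, ih (by omega)]

lemma pvAPrefixLen_le (cs : List Char) : pvAPrefixLen cs ≤ cs.length := by
  induction cs with
  | nil => simp [pvAPrefixLen]
  | cons c rest ih =>
    rw [pvAPrefixLen_cons]
    cases hq : pvQ c <;> simp [List.length_cons] <;> omega

lemma pvTake_prefixLen (cs : List Char) :
    cs.take (pvAPrefixLen cs) = cs.takeWhile pvQ := by
  induction cs with
  | nil => rfl
  | cons c rest ih =>
    rw [pvAPrefixLen_cons, List.takeWhile_cons]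
    cases hq : pvQ c
    · simp
    · simpa using ih

lemma pvBVal_eq_pvH (cs : List Char) (v : Int) :
    pvBVal cs v = pvH (cs.takeWhile pvQ) v := by
  induction cs generalizing v with
  | nil => rfl
  | cons c rest ih =>
    rw [List.takeWhile_cons]
    by_cases h : c = ','
    · have hq : pvQ c = true := by simp [pvQ, h]
      subst h
      simp only [pvBVal, pvH, hq, if_true, if_pos rfl]
      exact ih v
    · by_cases hd : PySem.Chars.isdigit c = true
      · have hq : pvQ c = true := by simp [pvQ, hd]
        simp only [pvBVal, pvH, hq, if_true, if_neg h, hd]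
        exact ih _
      · have hq : pvQ c = false := by simp [pvQ, h]; simpa using hd
        simp only [pvBVal, pvH, hq, if_neg h, Bool.false_eq_true, if_false]
        rw [if_neg (by simpa using hd)]

-- the per-token fact: A's scan-then-backward-read equals B's forward pass
lemma pvToken_eq (s : List Char) : pvABackward s (pvAPrefixLen s) 1 0 = pvBVal s 0 := by
  rw [pvABackward_eq_pvRAcc s _ (pvAPrefixLen_le s), pvTake_prefixLen, pvRAcc_reverse,
    pvBVal_eq_pvH]
  ring

lemma pvStartswith_eq (t : List Char) : PySem.Chars.startswith t ['$'] = pvIsDollar t := by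
  cases t with
  | nil => decide
  | cons c rest => simp [PySem.Chars.startswith, List.isPrefixOf, pvIsDollar, eq_comm]

-- A = B after both folds are put in filter/map form
lemma pvMain (toks : List (List Char)) :
    (toks.foldl (fun acc text =>
      match text with
      | [] => acc
      | c :: rest => if c = '$' then acc ++ [rest] else acc) []).foldl
        (fun vals s => vals ++ [pvABackward s (pvAPrefixLen s) 1 0]) [] =
    toks.foldl (fun values tok =>
      if PySem.Chars.startswith tok ['$'] then values ++ [pvBVal (tok.drop 1) 0] else values) [] := by
  have hf : (fun (acc : List (List Char)) (text : List Char) =>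
      match text with
      | [] => acc
      | c :: rest => if c = '$' then acc ++ [rest] else acc) =
      (fun acc text => if pvIsDollar text then acc ++ [text.drop 1] else acc) := by
    funext acc text
    cases text with
    | nil => rfl
    | cons c rest => by_cases h : c = '$' <;> simp [pvIsDollar, h]
  have hg : (fun (values : List Int) (tok : List Char) =>
      if PySem.Chars.startswith tok ['$'] then values ++ [pvBVal (tok.drop 1) 0] else values) =
      (fun values tok => if pvIsDollar tok then values ++ [pvBVal (tok.drop 1) 0] else values) := by
    funext values tok
    rw [pvStartswith_eq]
  rw [hf, hg, PySem.List.foldl_append_if, PySem.List.foldl_append_singleton_eq_map,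
    PySem.List.foldl_append_if]
  simp only [List.nil_append, List.map_map]
  refine List.map_congr_left ?_
  intro t _
  simp [pvToken_eq]

-- ===== VERDICT (by name: the statement is the Claim_ definition above) =====
theorem parse_dollars_spec : Claim_equal_parse_dollars := by
  intro dom_text _
  exact pvMain (PySem.Chars.split₀ dom_text.toList)
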